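-- pv_equiv track=rewrite | github.com/MinKyeom/KMK-DREAM | Programmers/lv3/아방가르드 타일링.py | solution
-- ===== SOURCE A (Python) =====
-- def solution(n):
--     # n:n가로 길이
--     dp = [0] * (n + 1)
--
--     dp[0] = 0
--
--     if n == 1:
--         dp[1] = 1
--         return dp[1] % 1000000007
--     elif n == 2:
--         dp[2] = 3
--         return dp[2] % 1000000007
--     elif n == 3:
--         dp[3] = 10
--         return dp[3] % 1000000007
--     else:
--         dp[0] = 0
--         dp[1] = 1
--         dp[2] = 3
--         dp[3] = 10
--
--     for i in range(4, n + 1):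
--         dp[i] = dp[i - 3] * 10
--
--     return dp[n] % 1000000007
-- ===== SOURCE B (Python) =====
-- def solution(n):
--     MOD = 1000000007
--     r = (n - 1) % 3 + 1                # representative in {1,2,3} with r == n (mod 3)
--     base = 3 if r == 2 else (10 if r == 3 else 1)
--     return base * pow(10, (n - r) // 3, MOD) % MOD
-- ===== Notes on version B (the rewrite author's own statement) =====
-- stated objective: faster
-- what changed: Replaced the O(n) big-integer DP loop (dp[i]=dp[i-3]*10 over a length-n list) with the closed form base(n mod 3) * pow(10, (n-r)//3, MOD) % MOD using built-in modular exponentiation.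
-- outside the precondition, e.g. on solution(0): A raises IndexError, B returns 1; on solution(-2): A raises IndexError, B returns 700000005
import Mathlib
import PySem

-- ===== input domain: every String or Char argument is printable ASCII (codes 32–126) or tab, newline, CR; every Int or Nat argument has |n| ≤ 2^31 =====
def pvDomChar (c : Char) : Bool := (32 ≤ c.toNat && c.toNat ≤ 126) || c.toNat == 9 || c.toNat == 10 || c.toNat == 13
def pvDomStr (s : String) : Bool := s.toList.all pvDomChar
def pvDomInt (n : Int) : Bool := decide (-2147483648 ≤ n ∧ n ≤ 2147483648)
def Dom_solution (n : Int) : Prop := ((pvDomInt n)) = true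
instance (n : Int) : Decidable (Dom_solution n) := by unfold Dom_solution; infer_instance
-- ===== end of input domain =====

-- B replaces A's O(n) big-integer DP loop by the closed form
-- base(n mod 3) * pow(10, (n-r)//3, MOD) % MOD with modular exponentiation (objective: faster).

-- ===== PORT A =====
-- body of `for i in range(4, n+1): dp[i] = dp[i-3] * 10`
def pvStep (dp : List Int) (i : Int) : List Int :=
  dp.set i.toNat (((PySem.List.pyGet? dp (i - 3)).getD 0) * 10)

def solution (n : Int) : Int :=
  -- dp = [0]*(n+1); dp[0] = 0
  if n = 1 then PySem.Int.mod 1 1000000007               -- dp[1] = 1; return dp[1] % MOD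
  else if n = 2 then PySem.Int.mod 3 1000000007
  else if n = 3 then PySem.Int.mod 10 1000000007
  else
    -- dp[0] = 0; dp[1] = 1; dp[2] = 3; dp[3] = 10; then the loop; return dp[n] % MOD
    PySem.Int.mod
      ((PySem.List.pyGet?
          ((PySem.List.pyRange 4 (n + 1) 1).foldl pvStep
            ((((((List.replicate (n + 1).toNat (0:Int)).set 0 0).set 0 0).set 1 1).set 2 3).set 3 10))
          n).getD 0)
      1000000007

-- ===== PORT B =====
-- r = (n - 1) % 3 + 1
def pvR (n : Int) : Int := PySem.Int.mod (n - 1) 3 + 1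
-- base = 3 if r == 2 else (10 if r == 3 else 1)
def pvBase (r : Int) : Int := if r = 2 then 3 else if r = 3 then 10 else 1

def solution_alt (n : Int) : Int :=
  -- pow(10, k, MOD) ported as 10 ^ k % MOD (exact for the nonnegative exponents reached on Pre_)
  PySem.Int.mod
    (pvBase (pvR n) *
      PySem.Int.mod (10 ^ (PySem.Int.floordiv (n - pvR n) 3).toNat) 1000000007)
    1000000007

-- ===== PRECONDITION & SPEC =====
-- Pre_ excludes n ≤ 0, where A raises IndexError (dp[1] = 1 writes past the end of [0]*(n+1)).
def Pre_solution (n : Int) : Prop := 1 ≤ n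
instance (n : Int) : Decidable (Pre_solution n) := by unfold Pre_solution; infer_instance
def pvWitness_solution : Int := (5)

def Spec_solution (n : Int) (out : Int) : Prop := out = solution_alt n
instance (n : Int) (out : Int) : Decidable (Spec_solution n out) := by unfold Spec_solution; infer_instance

-- ===== CLAIM (what is proved, stated in full; the proofs are below) =====
def Claim_equal_solution : Prop := ∀ (n : Int), Dom_solution n → Pre_solution n → Spec_solution n (solution n)

-- ===== LEMMAS AND PROOFS =====

-- closed form of the DP values: dp[k] = pvV k for 1 ≤ k
def pvV (k : Nat) : Int := (if k % 3 = 2 then 3 else 1) * 10 ^ (k / 3)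

lemma pvV_add3 (k : Nat) : pvV (k + 3) = pvV k * 10 := by
  simp only [pvV, Nat.add_mod_right, Nat.add_div_right _ (by norm_num : 0 < 3), pow_succ]
  ring

lemma pv_foldl_inv (dp0 : List Int) (m : Nat)
    (hlen : 4 + m ≤ dp0.length)
    (h1 : dp0.getD 1 0 = pvV 1) (h2 : dp0.getD 2 0 = pvV 2) (h3 : dp0.getD 3 0 = pvV 3) :
    ((PySem.List.pyRange 4 (4 + (m : Int)) 1).foldl pvStep dp0).length = dp0.length ∧
    ∀ k : Nat, 1 ≤ k → k ≤ 3 + m →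
      ((PySem.List.pyRange 4 (4 + (m : Int)) 1).foldl pvStep dp0).getD k 0 = pvV k := by
  induction m with
  | zero =>
    rw [show (4 + ((0:Nat) : Int)) = 4 by norm_num,
        PySem.List.pyRange_one_eq_nil (by norm_num)]
    refine ⟨rfl, ?_⟩
    intro k hk1 hk3
    interval_cases k <;> assumption
  | succ m ih =>
    have ih' := ih (by omega)
    rw [show (4 + ((m + 1 : Nat) : Int)) = (4 + (m : Nat) : Int) + 1 by push_cast; ring,
        PySem.List.pyRange_one_succ_right (by omega), List.foldl_append]
    set dp' := (PySem.List.pyRange 4 (4 + (m : Int)) 1).foldl pvStep dp0 with hdp'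
    obtain ⟨hL, hV⟩ := ih'
    have hidx : ((4 : Int) + (m : Nat)).toNat = 4 + m := by omega
    have hget : (PySem.List.pyGet? dp' ((4 : Int) + (m : Nat) - 3)).getD 0 = pvV (1 + m) := by
      rw [show ((4 : Int) + (m : Nat) - 3) = ((1 + m : Nat) : Int) by push_cast; ring,
          PySem.List.pyGet?_natCast]
      have hlt : 1 + m < dp'.length := by omega
      rw [List.getElem?_eq_getElem hlt]
      have := hV (1 + m) (by omega) (by omega)
      rwa [List.getD_eq_getElem?_getD, List.getElem?_eq_getElem hlt] at this
    simp only [List.foldl_cons, List.foldl_nil, pvStep, hidx, hget]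
    constructor
    · simp [hL]
    · intro k hk1 hk3
      rw [List.getD_eq_getElem?_getD, List.getElem?_set]
      by_cases hk : 4 + m = k
      · subst hk
        rw [if_pos rfl, if_pos (by omega)]
        have : pvV (1 + m) * 10 = pvV (4 + m) := by
          rw [show 4 + m = (1 + m) + 3 by omega, pvV_add3]
        simpa using this
      · rw [if_neg hk]
        have := hV k hk1 (by omega)
        rwa [List.getD_eq_getElem?_getD] at this

-- A computes pvV(n) % MOD for n ≥ 4
lemma pv_solution_big (t : Nat) (ht : 4 ≤ t) :
    solution (t : Int) = PySem.Int.mod (pvV t) 1000000007 := by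
  have htn : ((t : Int) + 1).toNat = t + 1 := by omega
  unfold solution
  rw [if_neg (by omega), if_neg (by omega), if_neg (by omega), htn]
  set dp0 : List Int :=
    (((((List.replicate (t + 1) (0:Int)).set 0 0).set 0 0).set 1 1).set 2 3).set 3 10 with hdp0
  have hlen0 : dp0.length = t + 1 := by simp [hdp0]
  have h1 : dp0.getD 1 0 = pvV 1 := by
    simp [hdp0, List.getD_eq_getElem?_getD, pvV, show 0 < t by omega]
  have h2 : dp0.getD 2 0 = pvV 2 := by
    simp [hdp0, List.getD_eq_getElem?_getD, pvV, show 2 ≤ t by omega]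
  have h3 : dp0.getD 3 0 = pvV 3 := by
    simp [hdp0, List.getD_eq_getElem?_getD, pvV, show 3 ≤ t by omega]
  obtain ⟨hL, hV⟩ := pv_foldl_inv dp0 (t - 3) (by omega) h1 h2 h3
  rw [show ((t : Int) + 1) = 4 + ((t - 3 : Nat) : Int) by omega]
  set dpF := (PySem.List.pyRange 4 (4 + ((t - 3 : Nat) : Int)) 1).foldl pvStep dp0 with hdpF
  have hVt := hV t (by omega) (by omega)
  have hlt : t < dpF.length := by omega
  rw [PySem.List.pyGet?_natCast, List.getElem?_eq_getElem hlt]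
  rw [List.getD_eq_getElem?_getD, List.getElem?_eq_getElem hlt] at hVt
  simpa using congrArg (fun x => PySem.Int.mod x 1000000007) hVt

-- B computes the same closed form mod MOD, for n ≥ 1
lemma pv_alt_closed (t : Nat) (ht : 1 ≤ t) :
    solution_alt (t : Int) = PySem.Int.mod (pvV t) 1000000007 := by
  have hM : (0 : Int) < 1000000007 := by norm_num
  have hr : pvR (t : Int) = ((t - 1) % 3 : Nat) + 1 := by
    unfold pvR
    rw [PySem.Int.mod_eq_emod_of_pos (by norm_num)]
    omega
  have hcases : (t - 1) % 3 = 0 ∨ (t - 1) % 3 = 1 ∨ (t - 1) % 3 = 2 := by omega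
  rcases hcases with h | h | h
  · -- t % 3 = 1, r = 1, base = 1, exponent (t-1)/3 = t/3
    have hm : t % 3 = 1 := by omega
    have hr1 : pvR (t : Int) = 1 := by rw [hr, h]; norm_num
    have he : (PySem.Int.floordiv ((t : Int) - 1) 3).toNat = t / 3 := by
      rw [PySem.Int.floordiv_eq_ediv_of_pos (by norm_num)]; omega
    unfold solution_alt pvBase
    rw [hr1, show ((t:Int) - 1) = (t:Int) - 1 from rfl, he,
        if_neg (by norm_num), if_neg (by norm_num), one_mul,
        PySem.Int.mod_eq_emod_of_pos hM, PySem.Int.mod_eq_emod_of_pos hM,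
        PySem.Int.mod_eq_emod_of_pos hM]
    simp [pvV, hm, Int.emod_emod_of_dvd]
  · -- t % 3 = 2, r = 2, base = 3, exponent (t-2)/3 = t/3
    have hm : t % 3 = 2 := by omega
    have hr2 : pvR (t : Int) = 2 := by rw [hr, h]; norm_num
    have he : (PySem.Int.floordiv ((t : Int) - 2) 3).toNat = t / 3 := by
      rw [PySem.Int.floordiv_eq_ediv_of_pos (by norm_num)]; omega
    unfold solution_alt pvBase
    rw [hr2, he, if_pos rfl,
        PySem.Int.mod_eq_emod_of_pos hM, PySem.Int.mod_eq_emod_of_pos hM,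
        PySem.Int.mod_eq_emod_of_pos hM]
    rw [Int.mul_emod 3 ((10:Int) ^ (t / 3) % 1000000007), Int.emod_emod_of_dvd _ dvd_rfl,
        ← Int.mul_emod]
    simp [pvV, hm]
  · -- t % 3 = 0, r = 3, base = 10, exponent (t-3)/3 = t/3 - 1
    have hm : t % 3 = 0 := by omega
    have ht3 : 3 ≤ t := by omega
    have hr3 : pvR (t : Int) = 3 := by rw [hr, h]; norm_num
    have he : (PySem.Int.floordiv ((t : Int) - 3) 3).toNat = t / 3 - 1 := by
      rw [PySem.Int.floordiv_eq_ediv_of_pos (by norm_num)]; omega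
    unfold solution_alt pvBase
    rw [hr3, he, if_neg (by norm_num), if_pos rfl,
        PySem.Int.mod_eq_emod_of_pos hM, PySem.Int.mod_eq_emod_of_pos hM,
        PySem.Int.mod_eq_emod_of_pos hM]
    rw [Int.mul_emod 10 ((10:Int) ^ (t / 3 - 1) % 1000000007), Int.emod_emod_of_dvd _ dvd_rfl,
        ← Int.mul_emod]
    have hp : (10 : Int) * 10 ^ (t / 3 - 1) = 10 ^ (t / 3) := by
      conv_rhs => rw [show t / 3 = (t / 3 - 1) + 1 by omega]
      rw [pow_succ]; ring
    simp [pvV, hm, hp]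

-- ===== VERDICT (by name: the statement is the Claim_ definition above) =====
theorem solution_spec : Claim_equal_solution := by
  intro n _ hpre
  have hp : (1 : Int) ≤ n := hpre
  unfold Spec_solution
  obtain ⟨t, rfl⟩ : ∃ t : Nat, n = (t : Int) := ⟨n.toNat, by omega⟩
  have ht : 1 ≤ t := by omega
  by_cases h4 : 4 ≤ t
  · rw [pv_solution_big t h4, pv_alt_closed t ht]
  · interval_cases t <;> decide
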